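-- pv_equiv track=rewrite | github.com/danielmarv/analytics | src/hiero_analytics/data_sources/governance_config.py | count_distinct_role_holders_by_role
-- ===== SOURCE A (Python) =====
-- from collections import defaultdict
--
-- def count_distinct_role_holders_by_role(
--     repo_role_lookup: dict[str, dict[str, str]],
-- ) -> dict[str, int]:
--     """Return distinct user counts for each role across all repositories."""
--     users_by_role: dict[str, set[str]] = defaultdict(set)
--     for repo_lookup in repo_role_lookup.values():
--         for user, role in repo_lookup.items():
--             users_by_role[role].add(user)
--
--     return {role: len(users) for role, users in users_by_role.items()}
-- ===== SOURCE B (Python) =====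
-- def count_distinct_role_holders_by_role(
--     repo_role_lookup: dict[str, dict[str, str]],
-- ) -> dict[str, int]:
--     """Return distinct user counts for each role across all repositories."""
--     pairs = [item for repo_lookup in repo_role_lookup.values() for item in repo_lookup.items()]
--     counts: dict[str, int] = {}
--     for _user, role in pairs:
--         if role not in counts:
--             counts[role] = len({u for u, r in pairs if r == role})
--     return counts
-- ===== Notes on version B (the rewrite author's own statement) =====
-- stated objective: alternative
-- what changed: Instead of incrementally grouping users into a dict of per-role sets and reading off lengths, B first flattens all (user, role) items into one list and then, at each role's first occurrence, computes its distinct-user count by a direct brute-force scan over the flat list.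
import Mathlib
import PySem

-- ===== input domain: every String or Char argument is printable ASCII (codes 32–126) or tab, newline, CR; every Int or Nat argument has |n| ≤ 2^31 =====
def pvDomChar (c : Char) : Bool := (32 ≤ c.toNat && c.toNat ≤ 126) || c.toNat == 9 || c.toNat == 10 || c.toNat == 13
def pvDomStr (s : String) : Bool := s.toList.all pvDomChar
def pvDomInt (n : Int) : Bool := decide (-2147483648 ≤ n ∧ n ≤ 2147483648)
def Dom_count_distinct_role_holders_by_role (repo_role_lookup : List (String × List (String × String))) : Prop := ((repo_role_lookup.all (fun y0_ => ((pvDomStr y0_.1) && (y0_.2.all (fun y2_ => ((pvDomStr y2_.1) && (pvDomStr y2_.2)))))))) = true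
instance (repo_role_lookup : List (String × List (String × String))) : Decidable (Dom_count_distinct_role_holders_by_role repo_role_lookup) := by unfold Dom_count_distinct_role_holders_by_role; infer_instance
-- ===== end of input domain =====

-- B flattens all items into one list first and brute-force counts each role's distinct users at its
-- first occurrence, instead of A's incremental dict of per-role sets: a different decomposition,
-- not faster (O(n·R) vs O(n)).

-- ===== PORT A =====
-- users_by_role: dict[str, set[str]] = defaultdict(set); nested loop adds user to users_by_role[role];
-- return {role: len(users) for role, users in users_by_role.items()}
def count_distinct_role_holders_by_role (repo_role_lookup : List (String × List (String × String))) : List (String × Int) :=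
  let users_by_role : PySem.Dict String (PySem.Set String) :=
    repo_role_lookup.foldl (fun d repo_lookup =>
      repo_lookup.2.foldl (fun d ur => d.modify ur.2 PySem.Set.empty (fun s => s.add ur.1)) d)
      PySem.Dict.empty
  users_by_role.items.map (fun p => (p.1, PySem.Set.len p.2))

-- ===== PORT B =====
-- pairs = flattened items; then for each (user, role) in pairs: if role not yet counted,
-- counts[role] = len({u for u, r in pairs if r == role})
def count_distinct_role_holders_by_role_alt (repo_role_lookup : List (String × List (String × String))) : List (String × Int) :=
  let pairs : List (String × String) := repo_role_lookup.flatMap (fun repo_lookup => repo_lookup.2)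
  (pairs.foldl (fun counts ur =>
      if counts.contains ur.2 then counts
      else counts.insert ur.2 (PySem.Set.len (PySem.Set.ofList ((pairs.filter (fun p => p.2 == ur.2)).map (·.1)))))
    PySem.Dict.empty).items

-- ===== PRECONDITION & SPEC =====
def Spec_count_distinct_role_holders_by_role (repo_role_lookup : List (String × List (String × String))) (out : List (String × Int)) : Prop := out = count_distinct_role_holders_by_role_alt repo_role_lookup
instance (repo_role_lookup : List (String × List (String × String))) (out : List (String × Int)) : Decidable (Spec_count_distinct_role_holders_by_role repo_role_lookup out) := by unfold Spec_count_distinct_role_holders_by_role; infer_instance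

-- ===== CLAIM (what is proved, stated in full; the proofs are below) =====
def Claim_equal_count_distinct_role_holders_by_role : Prop := ∀ (repo_role_lookup : List (String × List (String × String))), Dom_count_distinct_role_holders_by_role repo_role_lookup → Spec_count_distinct_role_holders_by_role repo_role_lookup (count_distinct_role_holders_by_role repo_role_lookup)

-- ===== LEMMAS AND PROOFS =====

-- A's grouping loop, read at one role
theorem pv_getD_groupLoop (L : List (String × String)) (d : PySem.Dict String (PySem.Set String)) (r : String) :
    (L.foldl (fun d ur => d.modify ur.2 PySem.Set.empty (fun s => s.add ur.1)) d).getD r PySem.Set.empty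
      = PySem.Set.update (d.getD r PySem.Set.empty) ((L.filter (fun ur => ur.2 == r)).map (·.1)) := by
  induction L generalizing d with
  | nil => simp [PySem.Set.update_nil]
  | cons p L ih =>
    simp only [List.foldl_cons, ih, List.filter_cons]
    by_cases hp : p.2 = r
    · simp [hp, PySem.Dict.getD_modify_self, PySem.Set.update_cons]
    · rw [PySem.Dict.getD_modify, if_neg (fun h => hp h.symm)]
      simp [beq_iff_eq, hp]

-- keys of B's conditional-insert loop: first occurrences appended, i.e. Set.update
theorem pv_B_keys (f : String → Int) (L : List (String × String)) (d : PySem.Dict String Int)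
    (hnd : d.keys.Nodup) :
    (L.foldl (fun c ur => if c.contains ur.2 then c else c.insert ur.2 (f ur.2)) d).keys
      = PySem.Set.update d.keys (L.map (·.2)) := by
  induction L generalizing d with
  | nil => simp [PySem.Set.update_nil]
  | cons p L ih =>
    simp only [List.foldl_cons, List.map_cons, PySem.Set.update_cons]
    by_cases hc : d.contains p.2 = true
    · rw [if_pos hc, ih d hnd,
        PySem.Set.add_of_mem ((PySem.Dict.contains_iff_mem_keys d p.2).mp hc)]
    · rw [if_neg hc, ih _ (PySem.Dict.nodup_keys_insert d p.2 _ hnd),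
        PySem.Dict.keys_insert_of_not_contains d _ (by simpa using hc),
        PySem.Set.add_of_not_mem (fun hm => hc ((PySem.Dict.contains_iff_mem_keys d p.2).mpr hm))]

-- lookup in B's loop result: old keys keep their value, new roles get f
theorem pv_B_getD (f : String → Int) (L : List (String × String)) (d : PySem.Dict String Int) (r : String) :
    (L.foldl (fun c ur => if c.contains ur.2 then c else c.insert ur.2 (f ur.2)) d).getD r 0
      = if d.contains r then d.getD r 0 else if r ∈ L.map (·.2) then f r else 0 := by
  induction L generalizing d with
  | nil =>
    by_cases hc : d.contains r = true
    · simp [hc]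
    · simp [hc, PySem.Dict.getD_of_not_contains d 0 (by simpa using hc)]
  | cons p L ih =>
    simp only [List.foldl_cons, List.map_cons, List.mem_cons]
    by_cases hc : d.contains p.2 = true
    · rw [if_pos hc, ih d]
      by_cases hr : d.contains r = true
      · simp [hr]
      · have hne : ¬ r = p.2 := fun h => hr (h ▸ hc)
        by_cases hm : r ∈ List.map (fun x => x.2) L <;> simp [hr, hne, hm]
    · rw [if_neg hc, ih]
      by_cases hrp : r = p.2
      · subst hrp
        simp [PySem.Dict.contains_insert_self, PySem.Dict.getD_insert_self, hc]
      · rw [PySem.Dict.contains_insert, PySem.Dict.getD_insert, if_neg hrp]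
        have hb : (r == p.2) = false := by simp [hrp]
        rw [hb]
        by_cases hr : d.contains r = true
        · simp [hr]
        · by_cases hm : r ∈ List.map (fun x => x.2) L <;> simp [hr, hrp, hm]

-- the two loops over one flat list produce the same items
theorem pv_main (L : List (String × String)) :
    (List.foldl (fun d ur => d.modify ur.2 PySem.Set.empty (fun s => s.add ur.1)) PySem.Dict.empty L).items.map
        (fun p => (p.1, PySem.Set.len p.2))
      = (List.foldl (fun counts ur =>
            if counts.contains ur.2 then counts
            else counts.insert ur.2 (PySem.Set.len (PySem.Set.ofList ((L.filter (fun p => p.2 == ur.2)).map (·.1)))))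
          PySem.Dict.empty L).items := by
  set f : String → Int := fun r => PySem.Set.len (PySem.Set.ofList ((L.filter (fun p => p.2 == r)).map (·.1))) with hf
  have hndA : (List.foldl (fun d ur => d.modify ur.2 PySem.Set.empty (fun s => s.add ur.1)) PySem.Dict.empty L).keys.Nodup :=
    PySem.Dict.nodup_keys_foldl_modify_key L (fun ur => ur.2) PySem.Set.empty (fun _ ur s => s.add ur.1) PySem.Dict.empty
      (by simp [PySem.Dict.keys_empty])
  have hkA : (List.foldl (fun d ur => d.modify ur.2 PySem.Set.empty (fun s => s.add ur.1)) PySem.Dict.empty L).keys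
      = PySem.Set.ofList (L.map (fun ur => ur.2)) := by
    have h := PySem.Dict.keys_foldl_modify_key L (fun ur => ur.2) PySem.Set.empty (fun _ ur s => s.add ur.1) PySem.Dict.empty
    simpa [PySem.Dict.keys_empty, PySem.Set.update_nil_left] using h
  have hkB : (L.foldl (fun c ur => if c.contains ur.2 then c else c.insert ur.2 (f ur.2)) PySem.Dict.empty).keys
      = PySem.Set.ofList (L.map (·.2)) := by
    rw [pv_B_keys f L PySem.Dict.empty (by simp [PySem.Dict.keys_empty]),
      PySem.Dict.keys_empty, PySem.Set.update_nil_left]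
  have hndB : (L.foldl (fun c ur => if c.contains ur.2 then c else c.insert ur.2 (f ur.2)) PySem.Dict.empty).keys.Nodup := by
    rw [hkB]; exact PySem.Set.nodup_ofList _
  rw [PySem.Dict.items_eq_map_keys _ hndA PySem.Set.empty,
    PySem.Dict.items_eq_map_keys _ hndB 0, hkA, hkB, List.map_map]
  refine List.map_congr_left (fun r hr => ?_)
  have hrmem : r ∈ L.map (·.2) := by
    have := (PySem.Set.mem_ofList (xs := L.map (·.2)) (y := r)).mp hr
    simpa using this
  simp only [Function.comp, Prod.mk.injEq]
  refine ⟨trivial, ?_⟩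
  rw [pv_B_getD, if_neg (by simp [PySem.Dict.contains_empty]), if_pos hrmem,
    pv_getD_groupLoop, PySem.Dict.getD_empty, PySem.Set.update_empty, hf]

-- ===== VERDICT (by name: the statement is the Claim_ definition above) =====
theorem count_distinct_role_holders_by_role_spec : Claim_equal_count_distinct_role_holders_by_role := by
  intro rrl _
  unfold Spec_count_distinct_role_holders_by_role
  unfold count_distinct_role_holders_by_role count_distinct_role_holders_by_role_alt
  rw [show (fun (d : PySem.Dict String (PySem.Set String)) (repo_lookup : String × List (String × String)) =>
        repo_lookup.2.foldl (fun d ur => d.modify ur.2 PySem.Set.empty (fun s => s.add ur.1)) d)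
      = (fun d repo_lookup => List.foldl (fun d ur => d.modify ur.2 PySem.Set.empty (fun s => s.add ur.1)) d repo_lookup.2) from rfl,
    ← List.foldl_flatMap]
  exact pv_main _
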